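-- pv_equiv track=rewrite | github.com/miliar/Code_Jam_Webscraper | solutions_python/solutions_year14_round4_nr2/96.py | is_valid_seq
-- ===== SOURCE A (Python) =====
-- def is_valid_seq(a):
--     prev = None
--     lower = True
--     for v in a:
--         if prev is not None and lower and prev > v:
--             lower = False
--             prev = v
--             continue
--         if prev is not None and not lower and prev < v:
--             return False
--         prev = v
--     return True
-- ===== SOURCE B (Python) =====
-- def is_valid_seq(a):
--     n = len(a)
--     i = 0
--     while i + 1 < n and a[i] <= a[i + 1]:
--         i += 1
--     while i + 1 < n and a[i] >= a[i + 1]: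
--         i += 1
--     return i + 1 >= n
-- ===== Notes on version B (the rewrite author's own statement) =====
-- stated objective: alternative
-- what changed: Replaces A's single flag-and-prev loop with two sequential index walks: climb the nondecreasing prefix, then walk the nonincreasing tail, and accept iff the walks reach the end.
import Mathlib
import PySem

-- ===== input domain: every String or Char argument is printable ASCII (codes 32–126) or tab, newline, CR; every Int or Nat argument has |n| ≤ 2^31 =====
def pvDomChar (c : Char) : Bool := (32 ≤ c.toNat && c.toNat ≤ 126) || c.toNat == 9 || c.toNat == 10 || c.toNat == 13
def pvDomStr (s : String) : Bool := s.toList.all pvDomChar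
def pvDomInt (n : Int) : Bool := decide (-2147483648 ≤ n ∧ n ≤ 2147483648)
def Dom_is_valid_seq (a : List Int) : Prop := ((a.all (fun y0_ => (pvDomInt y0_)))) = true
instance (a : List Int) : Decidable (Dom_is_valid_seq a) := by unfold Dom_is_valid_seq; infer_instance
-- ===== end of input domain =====

-- B replaces A's single flag-carrying loop with two sequential index walks (climb the
-- nondecreasing prefix, then the nonincreasing tail); same O(n) cost, different decomposition.

-- ===== PORT A =====
-- A's for-loop with state (prev, lower) and an early return; prev is None only before the
-- first element, so the loop body after the first element is this recursion.
def isValidGo (prev : Int) (lower : Bool) : List Int → Bool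
  | [] => true
  | v :: rest =>
    if lower && prev > v then isValidGo v false rest
    else if !lower && prev < v then false
    else isValidGo v lower rest

def is_valid_seq (a : List Int) : Bool :=
  match a with
  | [] => true
  | v :: rest => isValidGo v true rest

-- ===== PORT B =====
-- a[i] is taken with getD: under the loop guards i and i+1 are always in range, so this is
-- exact for Python's a[i].
def climb (a : List Int) (i : Nat) : Nat :=
  if i + 1 < a.length ∧ a.getD i 0 ≤ a.getD (i + 1) 0 then climb a (i + 1) else i
termination_by a.length - i
decreasing_by omega

def slide (a : List Int) (i : Nat) : Nat :=
  if i + 1 < a.length ∧ a.getD i 0 ≥ a.getD (i + 1) 0 then slide a (i + 1) else i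
termination_by a.length - i
decreasing_by omega

def is_valid_seq_alt (a : List Int) : Bool :=
  decide (a.length ≤ slide a (climb a 0) + 1)

-- ===== PRECONDITION & SPEC =====
def Spec_is_valid_seq (a : List Int) (out : Bool) : Prop := out = is_valid_seq_alt a
instance (a : List Int) (out : Bool) : Decidable (Spec_is_valid_seq a out) := by unfold Spec_is_valid_seq; infer_instance

-- ===== CLAIM (what is proved, stated in full; the proofs are below) =====
def Claim_equal_is_valid_seq : Prop := ∀ (a : List Int), Dom_is_valid_seq a → Spec_is_valid_seq a (is_valid_seq a)

-- ===== LEMMAS AND PROOFS =====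

theorem drop_succ_of_lt {a : List Int} {i : Nat} (h : i < a.length) :
    a.drop i = a.getD i 0 :: a.drop (i + 1) := by
  rw [List.getD_eq_getElem _ _ h]
  exact (List.getElem_cons_drop h).symm

theorem drop_eq_nil_of_ge {a : List Int} {i : Nat} (h : a.length ≤ i) :
    a.drop i = [] := List.drop_eq_nil_of_le h

-- the nonincreasing-tail walk matches A's lower=False phase
theorem slide_eq (a : List Int) (i : Nat) (hi : i < a.length) :
    isValidGo (a.getD i 0) false (a.drop (i + 1)) = decide (a.length ≤ slide a i + 1) := by
  by_cases h1 : i + 1 < a.length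
  · rw [drop_succ_of_lt h1]
    by_cases h2 : a.getD i 0 ≥ a.getD (i + 1) 0
    · rw [slide, if_pos ⟨h1, h2⟩]
      have := slide_eq a (i + 1) h1
      simp only [isValidGo]
      rw [if_neg (by simp), if_neg (by simp [- List.getD_eq_getElem?_getD]; omega)]
      exact this
    · rw [slide]
      rw [if_neg (by rintro ⟨_, h⟩; exact h2 h)]
      simp only [isValidGo]
      rw [if_neg (by simp), if_pos (by simp [- List.getD_eq_getElem?_getD]; omega)]
      symm; rw [decide_eq_false_iff_not]; omega
  · rw [drop_eq_nil_of_ge (by omega)]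
    rw [slide, if_neg (by rintro ⟨h, _⟩; exact h1 h)]
    simp only [isValidGo, true_eq_decide_iff]; omega
termination_by a.length - i
decreasing_by omega

-- the climb phase matches A's lower=True phase
theorem climb_eq (a : List Int) (i : Nat) (hi : i < a.length) :
    isValidGo (a.getD i 0) true (a.drop (i + 1)) = decide (a.length ≤ slide a (climb a i) + 1) := by
  by_cases h1 : i + 1 < a.length
  · rw [drop_succ_of_lt h1]
    by_cases h2 : a.getD i 0 ≤ a.getD (i + 1) 0
    · rw [climb, if_pos ⟨h1, h2⟩]
      have := climb_eq a (i + 1) h1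
      simp only [isValidGo]
      rw [if_neg (by simp [- List.getD_eq_getElem?_getD]; omega), if_neg (by simp)]
      exact this
    · rw [climb, if_neg (by rintro ⟨_, h⟩; exact h2 h)]
      simp only [isValidGo]
      rw [if_pos (by simp [- List.getD_eq_getElem?_getD]; omega)]
      rw [slide, if_pos ⟨h1, by omega⟩]
      exact slide_eq a (i + 1) h1
  · rw [drop_eq_nil_of_ge (by omega)]
    rw [climb, if_neg (by rintro ⟨h, _⟩; exact h1 h)]
    rw [slide, if_neg (by rintro ⟨h, _⟩; exact h1 h)]
    simp only [isValidGo, true_eq_decide_iff]; omega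
termination_by a.length - i
decreasing_by omega

-- ===== VERDICT (by name: the statement is the Claim_ definition above) =====
theorem is_valid_seq_spec : Claim_equal_is_valid_seq := by
  intro a _
  unfold Spec_is_valid_seq is_valid_seq is_valid_seq_alt
  match a with
  | [] => decide
  | v :: rest =>
    have h0 : (0 : Nat) < (v :: rest).length := by simp
    have := climb_eq (v :: rest) 0 h0
    simpa using this
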